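-- pv_equiv track=rewrite | github.com/ChealseaTan/cp1404practicals | prac_05/wimbledon.py | process_datas
-- ===== SOURCE A (Python) =====
-- COUNT_COUNTRY = 1
--
-- COUNT_CHAMPION = 2
--
-- def process_datas(datas):
--     champion_to_win = {}
--     countries = set()
--
--     for data in datas:
--         countries.add(data[COUNT_COUNTRY])
--         try:
--             champion_to_win[data[COUNT_CHAMPION]] += 1
--         except KeyError:
--             champion_to_win[data[COUNT_CHAMPION]] = 1
--     return champion_to_win, countries
-- ===== SOURCE B (Python) =====
-- COUNT_COUNTRY = 1
--
-- COUNT_CHAMPION = 2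
--
-- def process_datas(datas):
--     # Different decomposition: extract the champion column once, dedup it in
--     # first-occurrence order, and count each key with list.count; countries is
--     # a set comprehension over the country column.
--     champs = [data[COUNT_CHAMPION] for data in datas]
--     champion_to_win = {c: champs.count(c) for c in dict.fromkeys(champs)}
--     countries = {data[COUNT_COUNTRY] for data in datas}
--     return champion_to_win, countries
-- ===== Notes on version B (the rewrite author's own statement) =====
-- stated objective: alternative
-- what changed: Replaces the single try/except hash-counting loop with a column-wise pass: extract the champion column, dedup it in first-occurrence order and count each key with list.count, and build the country set by a comprehension.
import Mathlib
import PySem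

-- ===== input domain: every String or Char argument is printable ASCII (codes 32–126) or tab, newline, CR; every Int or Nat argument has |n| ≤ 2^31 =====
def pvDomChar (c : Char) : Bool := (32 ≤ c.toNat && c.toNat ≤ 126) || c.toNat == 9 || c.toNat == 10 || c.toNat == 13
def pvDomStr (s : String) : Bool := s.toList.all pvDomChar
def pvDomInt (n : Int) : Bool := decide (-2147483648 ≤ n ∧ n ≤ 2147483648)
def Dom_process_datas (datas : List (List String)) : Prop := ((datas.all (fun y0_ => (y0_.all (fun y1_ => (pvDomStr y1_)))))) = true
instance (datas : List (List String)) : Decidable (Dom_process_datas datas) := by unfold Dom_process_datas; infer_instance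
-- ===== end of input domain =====

-- B replaces A's try/except hash-counting loop by a column-wise pass (dedup the champion
-- column, count each key, set-comprehend the countries); alternative decomposition, same results.


-- ===== PORT A =====
-- data[1] / data[2] via pyGet?; the .getD "" default is never reached on Pre_ (rows have ≥ 3 fields)
def process_datas (datas : List (List String)) : (List (String × Int)) × List String :=
  let st := datas.foldl
    (fun (st : PySem.Dict String Int × PySem.Set String) data =>
      let countries := PySem.Set.add st.2 ((PySem.List.pyGet? data 1).getD "")
      let key := (PySem.List.pyGet? data 2).getD ""
      match st.1.get? key with
      | some v => (st.1.insert key (v + 1), countries)   -- champion_to_win[key] += 1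
      | none   => (st.1.insert key 1, countries))        -- except KeyError: = 1
    (PySem.Dict.empty, PySem.Set.empty)
  (st.1.items, st.2)

-- ===== PORT B =====
def process_datas_alt (datas : List (List String)) : (List (String × Int)) × List String :=
  let champs := datas.map (fun data => (PySem.List.pyGet? data 2).getD "")
  let champion_to_win := (PySem.List.dedup champs).map (fun c => (c, (champs.count c : Int)))
  let countries := PySem.Set.ofList (datas.map (fun data => (PySem.List.pyGet? data 1).getD ""))
  (champion_to_win, countries)

-- ===== PRECONDITION & SPEC =====
-- Pre_ excludes exactly the rows too short for data[2]/data[1]: there both A and B raise IndexError.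
def Pre_process_datas (datas : List (List String)) : Prop := ∀ data ∈ datas, 3 ≤ data.length
instance (datas : List (List String)) : Decidable (Pre_process_datas datas) := by unfold Pre_process_datas; infer_instance
def pvWitness_process_datas : List (List String) := [["2000", "AUS", "Smith"], ["2001", "GBR", "Smith"]]

def Spec_process_datas (datas : List (List String)) (out : (List (String × Int)) × List String) : Prop := out = process_datas_alt datas
instance (datas : List (List String)) (out : (List (String × Int)) × List String) : Decidable (Spec_process_datas datas out) := by unfold Spec_process_datas; infer_instance

-- ===== CLAIM (what is proved, stated in full; the proofs are below) =====
def Claim_equal_process_datas : Prop := ∀ (datas : List (List String)), Dom_process_datas datas → Pre_process_datas datas → Spec_process_datas datas (process_datas datas)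

-- ===== LEMMAS AND PROOFS =====

-- A's try/except branch is exactly "insert key (getD key 0 + 1)"
theorem counter_step_eq (d : PySem.Dict String Int) (k : String) (c : PySem.Set String) :
    (match d.get? k with
      | some v => (d.insert k (v + 1), c)
      | none   => (d.insert k 1, c)) = (d.insert k (d.getD k 0 + 1), c) := by
  cases h : d.get? k with
  | some v => simp [PySem.Dict.getD_of_get?_eq_some d 0 h]
  | none => simp [PySem.Dict.getD_of_get?_eq_none d 0 h]

-- ===== VERDICT (by name: the statement is the Claim_ definition above) =====
theorem process_datas_spec : Claim_equal_process_datas := by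
  intro datas _ _
  unfold Spec_process_datas process_datas process_datas_alt
  have hstep : datas.foldl
      (fun (st : PySem.Dict String Int × PySem.Set String) data =>
        let countries := PySem.Set.add st.2 ((PySem.List.pyGet? data 1).getD "")
        let key := (PySem.List.pyGet? data 2).getD ""
        match st.1.get? key with
        | some v => (st.1.insert key (v + 1), countries)
        | none   => (st.1.insert key 1, countries))
      (PySem.Dict.empty, PySem.Set.empty)
      = (datas.foldl (fun (d : PySem.Dict String Int) data =>
            d.insert ((PySem.List.pyGet? data 2).getD "")
              (d.getD ((PySem.List.pyGet? data 2).getD "") 0 + 1)) PySem.Dict.empty,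
         datas.foldl (fun (s : PySem.Set String) data =>
            PySem.Set.add s ((PySem.List.pyGet? data 1).getD "")) PySem.Set.empty) := by
    rw [← PySem.List.foldl_prod_mk
        (f := fun (d : PySem.Dict String Int) data =>
            d.insert ((PySem.List.pyGet? data 2).getD "")
              (d.getD ((PySem.List.pyGet? data 2).getD "") 0 + 1))
        (g := fun (s : PySem.Set String) data =>
            PySem.Set.add s ((PySem.List.pyGet? data 1).getD ""))]
    apply PySem.List.foldl_congr_mem
    intro acc x _
    exact counter_step_eq acc.1 ((PySem.List.pyGet? x 2).getD "") (acc.2.add ((PySem.List.pyGet? x 1).getD ""))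
  rw [hstep]
  refine Prod.ext ?_ ?_
  · show (datas.foldl _ _ : PySem.Dict String Int).items
        = (PySem.List.dedup (datas.map (fun data => (PySem.List.pyGet? data 2).getD ""))).map
            (fun c => (c, ((datas.map (fun data => (PySem.List.pyGet? data 2).getD "")).count c : Int)))
    rw [show (datas.foldl (fun (d : PySem.Dict String Int) data =>
          d.insert ((PySem.List.pyGet? data 2).getD "")
            (d.getD ((PySem.List.pyGet? data 2).getD "") 0 + 1)) PySem.Dict.empty)
        = ((datas.map (fun data => (PySem.List.pyGet? data 2).getD "")).foldl
            (fun (d : PySem.Dict String Int) x => d.insert x (d.getD x 0 + 1)) PySem.Dict.empty)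
      from by rw [List.foldl_map]]
    rw [PySem.Dict.foldl_insert_getD_add_one_eq_counter, PySem.Dict.items_counter]
    rfl
  · show (datas.foldl (fun (s : PySem.Set String) data =>
          PySem.Set.add s ((PySem.List.pyGet? data 1).getD "")) PySem.Set.empty)
        = PySem.Set.ofList (datas.map (fun data => (PySem.List.pyGet? data 1).getD ""))
    rw [PySem.Set.ofList, List.foldl_map]
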